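-- pv_equiv track=rewrite | github.com/sushant-reach/phython | PycharmProjects/scaler2/main.py | solve
-- ===== SOURCE A (Python) =====
-- def solve(A):
--     count = 0
--     substr = 0
--     for i in A:
--         if i == "1":
--             count += 1
--         else:
--             count -= 1
--
--         if count == 0:
--             substr += 1
--
--     if count == 0:
--         return substr
--     else:
--         return 1
-- ===== SOURCE B (Python) =====
-- def solve(A):
--     # Brute force over prefixes: a prefix of length k is balanced iff it
--     # contains exactly k/2 ones, i.e. 2 * ones(k) == k.  No running balance
--     # is maintained: each prefix is recounted from scratch (O(n^2)), and the
--     # guard on the full string is decided up front.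
--     n = len(A)
--
--     def ones(k):
--         return sum(c == "1" for c in A[:k])
--
--     if 2 * ones(n) != n:
--         return 1
--     return sum(2 * ones(k) == k for k in range(1, n + 1))
-- ===== Notes on version B (the rewrite author's own statement) =====
-- stated objective: alternative
-- what changed: B drops A's streaming balance/counter entirely: it recounts the ones of every prefix from scratch and tests 2*ones(k)==k per prefix length (brute force over prefixes, O(n^2)), deciding the final-balance guard up front from the whole string, instead of A's single fused loop maintaining a running balance and an inline zero counter.
import Mathlib
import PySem

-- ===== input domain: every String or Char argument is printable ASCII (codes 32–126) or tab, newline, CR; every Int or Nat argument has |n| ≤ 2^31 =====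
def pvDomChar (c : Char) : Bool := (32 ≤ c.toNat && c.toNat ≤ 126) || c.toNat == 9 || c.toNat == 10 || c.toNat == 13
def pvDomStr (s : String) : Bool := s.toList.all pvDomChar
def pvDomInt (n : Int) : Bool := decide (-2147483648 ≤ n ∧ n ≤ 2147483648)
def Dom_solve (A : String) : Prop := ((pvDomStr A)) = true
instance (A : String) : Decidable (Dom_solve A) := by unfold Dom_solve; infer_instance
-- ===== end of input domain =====

-- B recounts each prefix's ones from scratch and tests 2*ones(k)==k per prefix (brute force,
-- O(n^2)) instead of A's single streaming balance-and-counter loop; alternative decomposition.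


-- ===== PORT A =====
def solve (A : String) : Int :=
  let r := A.toList.foldl (fun (p : Int × Int) i =>
    let count := if i = '1' then p.1 + 1 else p.1 - 1
    (count, if count = 0 then p.2 + 1 else p.2)) (0, 0)
  if r.1 = 0 then r.2 else 1

-- ===== PORT B =====
-- ones(k) = sum(c == "1" for c in A[:k])
def solveOnes (A : String) (k : Int) : Int :=
  ((PySem.List.slice A.toList none (some k)).map (fun c => if c = '1' then (1 : Int) else 0)).sum

def solve_alt (A : String) : Int :=
  let n : Int := PySem.Str.len A
  if 2 * solveOnes A n ≠ n then 1
  else ((PySem.List.pyRange 1 (n + 1) 1).map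
          (fun k => if 2 * solveOnes A k = k then (1 : Int) else 0)).sum

-- ===== PRECONDITION & SPEC =====
def Spec_solve (A : String) (out : Int) : Prop := out = solve_alt A
instance (A : String) (out : Int) : Decidable (Spec_solve A out) := by unfold Spec_solve; infer_instance

-- ===== CLAIM (what is proved, stated in full; the proofs are below) =====
def Claim_equal_solve : Prop := ∀ (A : String), Dom_solve A → Spec_solve A (solve A)

-- ===== LEMMAS AND PROOFS =====

-- final balance of A's loop starting at b
def pvFin (b : Int) : List Char → Int
  | [] => b
  | c :: t => pvFin (b + (if c = '1' then 1 else -1)) t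

-- number of zero-balance prefixes, with the balance starting at b
def pvZC (b : Int) : List Char → Int
  | [] => 0
  | c :: t =>
    (if b + (if c = '1' then 1 else -1) = 0 then 1 else 0)
      + pvZC (b + (if c = '1' then 1 else -1)) t

lemma pvFoldl_eq (l : List Char) : ∀ (c0 s0 : Int),
    l.foldl (fun (p : Int × Int) i =>
      let count := if i = '1' then p.1 + 1 else p.1 - 1
      (count, if count = 0 then p.2 + 1 else p.2)) (c0, s0)
    = (pvFin c0 l, s0 + pvZC c0 l) := by
  induction l with
  | nil => intro c0 s0; simp [pvFin, pvZC]
  | cons c t ih =>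
    intro c0 s0
    have hb : (if c = '1' then c0 + 1 else c0 - 1) = c0 + (if c = '1' then (1 : Int) else -1) := by
      split <;> ring
    simp only [List.foldl_cons, pvFin, pvZC, hb, ih]
    by_cases h0 : c0 + (if c = '1' then (1 : Int) else -1) = 0 <;> simp [h0] <;> ring

lemma pvFin_eq (l : List Char) : ∀ (b : Int),
    pvFin b l = b + 2 * ((l.count '1' : Int)) - l.length := by
  induction l with
  | nil => intro b; simp [pvFin]
  | cons c t ih =>
    intro b
    by_cases hc : c = '1' <;> simp [pvFin, hc, ih, List.count_cons] <;> push_cast <;> ring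

lemma pvOnes_take (l : List Char) (k : Nat) :
    ((l.take k).map (fun c => if c = '1' then (1 : Int) else 0)).sum
      = ((l.take k).count '1' : Int) := by
  induction l generalizing k with
  | nil => simp
  | cons c t ih =>
    cases k with
    | zero => simp
    | succ k =>
      rw [List.take_succ_cons, List.map_cons, List.sum_cons, ih, List.count_cons]
      by_cases hc : c = '1' <;> simp [hc] <;> push_cast <;> ring

lemma pvSum_eq_zc (l : List Char) : ∀ (b : Int),
    ((List.range l.length).map
      (fun j => if b + 2 * (((l.take (j + 1)).count '1' : Int)) - ((j : Int) + 1) = 0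
                then (1 : Int) else 0)).sum = pvZC b l := by
  induction l with
  | nil => intro b; simp [pvZC]
  | cons c t ih =>
    intro b
    rw [List.length_cons, List.range_succ_eq_map, List.map_cons, List.map_map, List.sum_cons]
    show _ + _ = pvZC b (c :: t)
    rw [pvZC]
    congr 1
    · refine if_congr ?_ rfl rfl
      by_cases hc : c = '1' <;> simp [hc] <;> omega
    · rw [← ih (b + (if c = '1' then (1 : Int) else -1))]
      refine congrArg List.sum (List.map_congr_left ?_)
      intro j hj
      simp only [Function.comp_apply, List.take_succ_cons, List.count_cons]
      refine if_congr ?_ rfl rfl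
      by_cases hc : c = '1' <;> simp [hc] <;> push_cast <;> omega

lemma pvOnes_natCast (A : String) (k : Nat) :
    solveOnes A (k : Int) = ((A.toList.take k).count '1' : Int) := by
  rw [solveOnes, PySem.List.slice_to_natCast, pvOnes_take]

-- ===== VERDICT (by name: the statement is the Claim_ definition above) =====
theorem solve_spec : Claim_equal_solve := by
  intro A _
  show solve A = solve_alt A
  have hn : PySem.Str.len A = (A.toList.length : Int) := by
    simp [PySem.Str.len_eq]
  have hones : solveOnes A (PySem.Str.len A) = ((A.toList.count '1' : Int)) := by
    rw [hn, pvOnes_natCast, List.take_length]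
  have hguard : (2 * solveOnes A (PySem.Str.len A) ≠ PySem.Str.len A)
      ↔ pvFin 0 A.toList ≠ 0 := by
    rw [hones, hn, pvFin_eq]
    constructor <;> intro h <;> omega
  have hsum : ((PySem.List.pyRange 1 (PySem.Str.len A + 1) 1).map
        (fun k => if 2 * solveOnes A k = k then (1 : Int) else 0)).sum
      = pvZC 0 A.toList := by
    rw [hn, PySem.List.pyRange_one]
    have h1 : ((A.toList.length : Int) + 1 - 1).toNat = A.toList.length := by omega
    rw [h1, List.map_map, ← pvSum_eq_zc A.toList 0]
    refine congrArg List.sum (List.map_congr_left ?_)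
    intro j hj
    simp only [Function.comp_apply]
    have h2 : (1 : Int) + (j : Int) = ((j + 1 : Nat) : Int) := by push_cast; ring
    rw [h2, pvOnes_natCast]
    refine if_congr ?_ rfl rfl
    push_cast
    constructor <;> intro h <;> omega
  have hA : solve A = if pvFin 0 A.toList = 0 then pvZC 0 A.toList else 1 := by
    show (if (A.toList.foldl (fun (p : Int × Int) i =>
        let count := if i = '1' then p.1 + 1 else p.1 - 1
        (count, if count = 0 then p.2 + 1 else p.2)) (0, 0)).1 = 0
      then (A.toList.foldl (fun (p : Int × Int) i =>
        let count := if i = '1' then p.1 + 1 else p.1 - 1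
        (count, if count = 0 then p.2 + 1 else p.2)) (0, 0)).2 else 1) = _
    rw [pvFoldl_eq]
    simp
  have hB : solve_alt A = if pvFin 0 A.toList ≠ 0 then 1 else pvZC 0 A.toList := by
    show (if 2 * solveOnes A (PySem.Str.len A) ≠ PySem.Str.len A then 1
          else ((PySem.List.pyRange 1 (PySem.Str.len A + 1) 1).map
            (fun k => if 2 * solveOnes A k = k then (1 : Int) else 0)).sum) = _
    rw [hsum]
    refine if_congr hguard rfl rfl
  rw [hA, hB]
  by_cases hf : pvFin 0 A.toList = 0 <;> simp [hf]
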